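-- pv_equiv track=rewrite | github.com/TauferLab/ANACIN-X | anacin-x/event_graph_analysis/utilities.py | all_unique_keys
-- ===== SOURCE A (Python) =====
-- def all_unique_keys( list_of_dicts ):
--     all_keys = []
--     for d in list_of_dicts:
--         all_keys += list( d.keys() )
--     key_set = set( all_keys )
--     if len(key_set) != len(all_keys):
--         return False
--     else:
--         return True
-- ===== SOURCE B (Python) =====
-- def all_unique_keys(list_of_dicts):
--     seen = set()
--     for d in list_of_dicts:
--         for k in d.keys():
--             if k in seen:
--                 return False
--             seen.add(k)
--     return True
-- ===== Notes on version B (the rewrite author's own statement) =====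
-- stated objective: faster
-- what changed: Replaces build-the-full-key-list-then-compare-set-and-list-lengths with a single incremental pass that maintains only a seen set and returns False on the first repeated key (short-circuit).
import Mathlib
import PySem

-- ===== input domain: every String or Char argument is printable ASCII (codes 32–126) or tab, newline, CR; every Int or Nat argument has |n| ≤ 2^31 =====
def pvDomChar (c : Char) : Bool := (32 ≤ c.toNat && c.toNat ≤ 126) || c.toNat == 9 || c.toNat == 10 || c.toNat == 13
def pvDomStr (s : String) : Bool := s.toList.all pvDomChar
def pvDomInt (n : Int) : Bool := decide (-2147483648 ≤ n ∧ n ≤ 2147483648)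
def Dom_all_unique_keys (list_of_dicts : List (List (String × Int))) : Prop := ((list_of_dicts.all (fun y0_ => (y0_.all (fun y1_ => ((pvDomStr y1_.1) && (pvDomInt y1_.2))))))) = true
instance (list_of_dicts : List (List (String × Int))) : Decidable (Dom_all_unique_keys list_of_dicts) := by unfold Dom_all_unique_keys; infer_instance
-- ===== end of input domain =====

-- B replaces A's build-full-key-list-then-compare-set/list-lengths with one short-circuiting
-- pass maintaining only a 'seen' set (objective: faster — stops at the first duplicate key).


-- ===== PORT A =====
def all_unique_keys (list_of_dicts : List (List (String × Int))) : Bool :=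
  let all_keys : List String :=
    list_of_dicts.foldl (fun acc d => acc ++ (PySem.Dict.ofList d).keys) []
  let key_set : PySem.Set String := PySem.Set.ofList all_keys
  if key_set.length ≠ all_keys.length then false else true

-- ===== PORT B =====
-- inner loop: 'for k in d.keys(): …'; none signals the early 'return False'
def aukInner (seen : PySem.Set String) : List String → Option (PySem.Set String)
  | [] => some seen
  | k :: rest =>
    if PySem.Set.contains seen k then none
    else aukInner (PySem.Set.add seen k) rest

-- outer loop: 'for d in list_of_dicts: …'
def aukOuter (seen : PySem.Set String) : List (List (String × Int)) → Bool
  | [] => true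
  | d :: rest =>
    match aukInner seen (PySem.Dict.ofList d).keys with
    | none => false
    | some seen' => aukOuter seen' rest

def all_unique_keys_alt (list_of_dicts : List (List (String × Int))) : Bool :=
  aukOuter PySem.Set.empty list_of_dicts

-- ===== PRECONDITION & SPEC =====
def Spec_all_unique_keys (list_of_dicts : List (List (String × Int))) (out : Bool) : Prop := out = all_unique_keys_alt list_of_dicts
instance (list_of_dicts : List (List (String × Int))) (out : Bool) : Decidable (Spec_all_unique_keys list_of_dicts out) := by unfold Spec_all_unique_keys; infer_instance

-- ===== CLAIM (what is proved, stated in full; the proofs are below) =====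
def Claim_equal_all_unique_keys : Prop := ∀ (list_of_dicts : List (List (String × Int))), Dom_all_unique_keys list_of_dicts → Spec_all_unique_keys list_of_dicts (all_unique_keys list_of_dicts)

-- ===== LEMMAS AND PROOFS =====

-- the flattened key lists both programs are about
def flatKeys (lod : List (List (String × Int))) : List String :=
  (lod.map (fun d => (PySem.Dict.ofList d).keys)).flatten

theorem foldl_append_keys (lod : List (List (String × Int))) (acc : List String) :
    lod.foldl (fun acc d => acc ++ (PySem.Dict.ofList d).keys) acc = acc ++ flatKeys lod := by
  induction lod generalizing acc with
  | nil => simp [flatKeys]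
  | cons d rest ih => simp [List.foldl, flatKeys, ih, List.append_assoc]

theorem length_foldl_add_le (xs : List String) (s : PySem.Set String) :
    (xs.foldl PySem.Set.add s).length ≤ s.length + xs.length := by
  induction xs generalizing s with
  | nil => simp
  | cons x xs ih =>
    have h := ih (PySem.Set.add s x)
    have hlen : (PySem.Set.add s x).length ≤ s.length + 1 := by
      rw [PySem.Set.add_eq_ite]
      split <;> simp
    simp only [List.foldl_cons, List.length_cons]
    omega

theorem length_foldl_add_eq_iff (xs : List String) (s : PySem.Set String) (hs : s.Nodup) :
    (xs.foldl PySem.Set.add s).length = s.length + xs.length ↔ (s ++ xs).Nodup := by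
  induction xs generalizing s with
  | nil => simpa using hs
  | cons x xs ih =>
    by_cases hx : x ∈ s
    · have hadd : PySem.Set.add s x = s := PySem.Set.add_of_mem hx
      have hle := length_foldl_add_le xs s
      constructor
      · intro h
        simp only [List.foldl_cons, hadd, List.length_cons] at h
        omega
      · intro h
        exact ((List.disjoint_of_nodup_append h) hx List.mem_cons_self).elim
    · have hadd : PySem.Set.add s x = s ++ [x] := PySem.Set.add_of_not_mem hx
      have hnodup : (s ++ [x]).Nodup := by
        exact List.Nodup.append hs (List.nodup_singleton x) (by simp [List.disjoint_singleton, hx])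
      have harr : s ++ x :: xs = (s ++ [x]) ++ xs := by simp
      have hlentot : (s ++ [x]).length + xs.length = s.length + (x :: xs).length := by
        simp [List.length_append]
        omega
      rw [List.foldl_cons, hadd, harr, ← hlentot]
      exact ih (s ++ [x]) hnodup

theorem length_ofList_eq_iff (xs : List String) :
    (PySem.Set.ofList xs).length = xs.length ↔ xs.Nodup := by
  have h := length_foldl_add_eq_iff xs ([] : PySem.Set String) (by simp)
  simpa [PySem.Set.ofList_eq_foldl] using h

theorem all_unique_keys_eq_decide (lod : List (List (String × Int))) :
    all_unique_keys lod = decide (flatKeys lod).Nodup := by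
  unfold all_unique_keys
  simp only [foldl_append_keys, List.nil_append]
  by_cases h : (flatKeys lod).Nodup
  · have := (length_ofList_eq_iff (flatKeys lod)).mpr h
    simp [this, h]
  · have hne : (PySem.Set.ofList (flatKeys lod)).length ≠ (flatKeys lod).length :=
      fun hc => h ((length_ofList_eq_iff _).mp hc)
    simp [hne, h]

theorem aukInner_eq (ks : List String) (seen : PySem.Set String) (hs : seen.Nodup) :
    aukInner seen ks = if (List.Nodup (seen ++ ks)) then some (seen ++ ks) else none := by
  induction ks generalizing seen with
  | nil => simp [aukInner, hs]
  | cons k rest ih =>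
    by_cases hk : k ∈ seen
    · have hc : PySem.Set.contains seen k = true := (PySem.Set.contains_iff seen k).mpr hk
      have hnd : ¬ (seen ++ k :: rest).Nodup := fun h =>
        (List.disjoint_of_nodup_append h) hk List.mem_cons_self
      simp [aukInner, hnd]
      exact fun h => absurd hk h
    · have hc : PySem.Set.contains seen k = false := by
        rcases Bool.eq_false_or_eq_true (PySem.Set.contains seen k) with h | h
        · exact absurd ((PySem.Set.contains_iff seen k).mp h) hk
        · exact h
      have hadd : PySem.Set.add seen k = seen ++ [k] := PySem.Set.add_of_not_mem hk
      have hnodup : (seen ++ [k]).Nodup := by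
        exact List.Nodup.append hs (List.nodup_singleton k) (by simp [List.disjoint_singleton, hk])
      have harr : (seen ++ [k]) ++ rest = seen ++ k :: rest := by simp
      simp only [aukInner, hc, Bool.false_eq_true, if_false, hadd, ih _ hnodup, harr]

theorem aukOuter_eq (lod : List (List (String × Int))) (seen : PySem.Set String)
    (hs : seen.Nodup) :
    aukOuter seen lod = decide (seen ++ flatKeys lod).Nodup := by
  induction lod generalizing seen with
  | nil => simp [aukOuter, flatKeys, hs]
  | cons d rest ih =>
    rw [aukOuter, aukInner_eq _ _ hs]
    have harr : seen ++ flatKeys (d :: rest)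
        = (seen ++ (PySem.Dict.ofList d).keys) ++ flatKeys rest := by
      simp [flatKeys, List.append_assoc]
    by_cases h : (seen ++ (PySem.Dict.ofList d).keys).Nodup
    · rw [if_pos h]
      simp only [ih _ h]
      congr 1
      rw [harr]
    · rw [if_neg h]
      have hsub : ¬ (seen ++ flatKeys (d :: rest)).Nodup := by
        intro hc
        rw [harr] at hc
        exact h hc.of_append_left
      simp [hsub]

theorem alt_eq_decide (lod : List (List (String × Int))) :
    all_unique_keys_alt lod = decide (flatKeys lod).Nodup := by
  unfold all_unique_keys_alt
  have h := aukOuter_eq lod PySem.Set.empty (by simp [PySem.Set.empty])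
  simpa [PySem.Set.empty] using h

-- ===== VERDICT (by name: the statement is the Claim_ definition above) =====
theorem all_unique_keys_spec : Claim_equal_all_unique_keys := by
  intro lod _
  unfold Spec_all_unique_keys
  rw [all_unique_keys_eq_decide, alt_eq_decide]
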